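-- pv_equiv track=rewrite | github.com/Saee2803/NLP_Smart_Assistant | nlp_engine/intelligence_engine.py | widen_condition_search
-- ===== SOURCE A (Python) =====
-- from collections import Counter, defaultdict
-- from typing import Dict, List, Any, Optional, Tuple
--
-- def widen_condition_search(alerts: List[Dict],
--                            primary_condition: str,
--                            field: str = "alert_state") -> Tuple[List[Dict], str]:
--     """
--     Search for alerts matching a condition, widening if needed.
--
--     Example: No STOP alerts → but 483,932 INTERNAL_ERROR alerts exist
--     """
--     if not alerts:
--         return [], "No alerts available"
--
--     primary_upper = primary_condition.upper()
--     search_report = []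
--
--     # Step 1: Exact condition match
--     exact = [a for a in alerts if (a.get(field) or "").upper() == primary_upper]
--     if exact:
--         return exact, "Found {} {} alerts".format(len(exact), primary_upper)
--     search_report.append("No {} alerts".format(primary_upper))
--
--     # Step 2: Contains match
--     contains = [a for a in alerts if primary_upper in (a.get(field) or "").upper()]
--     if contains:
--         return contains, "Found {} alerts containing '{}'".format(len(contains), primary_upper)
--
--     # Step 3: Report what DOES exist
--     field_counts = Counter()
--     for a in alerts:
--         val = (a.get(field) or a.get("issue_type") or a.get("alert_type") or "UNKNOWN").upper()
--         field_counts[val] += 1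
--
--     alternatives = []
--     for val, count in field_counts.most_common(5):
--         alternatives.append("{}: {:,}".format(val, count))
--
--     explanation = "{}. However, found: {}".format(
--         search_report[0] if search_report else "No exact match",
--         ", ".join(alternatives)
--     )
--
--     return [], explanation
-- ===== SOURCE B (Python) =====
-- from collections import Counter
-- from typing import Dict, List, Tuple
--
-- def widen_condition_search(alerts: List[Dict],
--                            primary_condition: str,
--                            field: str = "alert_state") -> Tuple[List[Dict], str]:
--     """Single pass over alerts building exact matches, contains matches and the
--     type counter at once, then the same decision cascade as before."""
--     if not alerts:
--         return [], "No alerts available"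
--
--     primary_upper = primary_condition.upper()
--     exact, contains = [], []
--     field_counts = Counter()
--     for a in alerts:
--         val = (a.get(field) or "").upper()
--         if val == primary_upper:
--             exact.append(a)
--         if primary_upper in val:
--             contains.append(a)
--         key = (a.get(field) or a.get("issue_type") or a.get("alert_type") or "UNKNOWN").upper()
--         field_counts[key] += 1
--
--     if exact:
--         return exact, "Found {} {} alerts".format(len(exact), primary_upper)
--     if contains:
--         return contains, "Found {} alerts containing '{}'".format(len(contains), primary_upper)
--
--     alternatives = ["{}: {:,}".format(v, c) for v, c in field_counts.most_common(5)]
--     return [], "No {} alerts. However, found: {}".format(primary_upper, ", ".join(alternatives))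
-- ===== Notes on version B (the rewrite author's own statement) =====
-- stated objective: alternative
-- what changed: A makes three separate passes over alerts (an exact-match filter, a contains filter, then a Counter loop); B makes a single pass that builds the exact list, the contains list and the type counter simultaneously, then applies the same decision cascade.
import Mathlib
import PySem

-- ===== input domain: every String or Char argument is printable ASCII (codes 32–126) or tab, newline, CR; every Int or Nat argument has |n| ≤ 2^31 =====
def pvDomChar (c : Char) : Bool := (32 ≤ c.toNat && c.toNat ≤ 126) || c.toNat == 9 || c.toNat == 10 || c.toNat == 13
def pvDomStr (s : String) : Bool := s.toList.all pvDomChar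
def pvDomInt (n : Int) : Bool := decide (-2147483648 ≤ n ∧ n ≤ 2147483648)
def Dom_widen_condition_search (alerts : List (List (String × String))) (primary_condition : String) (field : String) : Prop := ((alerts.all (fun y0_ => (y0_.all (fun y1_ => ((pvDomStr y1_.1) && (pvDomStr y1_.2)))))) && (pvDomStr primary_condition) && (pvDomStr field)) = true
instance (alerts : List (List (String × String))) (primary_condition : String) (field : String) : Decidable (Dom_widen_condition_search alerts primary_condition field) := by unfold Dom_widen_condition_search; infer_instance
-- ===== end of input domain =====

-- B fuses A's three separate passes over the alerts (exact filter, contains filter,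
-- Counter loop) into one loop building all three at once; objective: alternative
-- (single traversal), same asymptotic cost.

-- shared helpers (both Pythons contain the identical subexpressions):
-- `(a.get(k) or "")` — missing key and empty value both yield ""
def pvGetOr (a : List (String × String)) (k : String) : String :=
  ((PySem.Dict.mk a).get? k).getD ""

-- `(a.get(field) or a.get("issue_type") or a.get("alert_type") or "UNKNOWN")`
def pvFallback (a : List (String × String)) (field : String) : String :=
  let v1 := pvGetOr a field
  if v1 ≠ "" then v1 else
  let v2 := pvGetOr a "issue_type"
  if v2 ≠ "" then v2 else
  let v3 := pvGetOr a "alert_type"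
  if v3 ≠ "" then v3 else "UNKNOWN"

-- "{:,}".format(n): decimal digits grouped from the right in threes (exact for ints)
def pvCommaRev : List Char → List Char
  | a :: b :: c :: d :: rest => a :: b :: c :: ',' :: pvCommaRev (d :: rest)
  | l => l

def pvCommaFmt (n : Int) : String :=
  (if n < 0 then "-" else "") ++
    String.ofList ((pvCommaRev (PySem.Int.toStr (n.natAbs : Int)).toList.reverse).reverse)

-- `field_counts.most_common(5)`: stable sort by count descending, first five
def pvMostCommon5 (d : PySem.Dict String Int) : List (String × Int) :=
  (PySem.List.sorted d.items (fun p => p.2) true).take 5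

-- ===== PORT A =====
def widen_condition_search (alerts : List (List (String × String))) (primary_condition : String) (field : String) : (List (List (String × String))) × String :=
  if alerts = [] then ([], "No alerts available")
  else
    let primary_upper := PySem.Str.upper primary_condition
    -- Step 1: exact condition match
    let exact := alerts.filter (fun a => PySem.Str.upper (pvGetOr a field) == primary_upper)
    if exact ≠ [] then
      (exact, "Found " ++ PySem.Int.toStr (exact.length : Int) ++ " " ++ primary_upper ++ " alerts")
    else
      let search_report : List String := [] ++ ["No " ++ primary_upper ++ " alerts"]
      -- Step 2: contains match
      let contains := alerts.filter (fun a => PySem.Str.isIn primary_upper (PySem.Str.upper (pvGetOr a field)))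
      if contains ≠ [] then
        (contains, "Found " ++ PySem.Int.toStr (contains.length : Int) ++ " alerts containing '" ++ primary_upper ++ "'")
      else
        -- Step 3: report what does exist
        let field_counts := alerts.foldl
          (fun d a => d.modify (PySem.Str.upper (pvFallback a field)) 0 (· + 1))
          PySem.Dict.empty
        let alternatives := (pvMostCommon5 field_counts).map (fun p => p.1 ++ ": " ++ pvCommaFmt p.2)
        ([], search_report.headD "No exact match" ++ ". However, found: " ++ PySem.Str.join ", " alternatives)

-- ===== PORT B =====
def widen_condition_search_alt (alerts : List (List (String × String))) (primary_condition : String) (field : String) : (List (List (String × String))) × String :=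
  if alerts = [] then ([], "No alerts available")
  else
    let primary_upper := PySem.Str.upper primary_condition
    -- single pass: exact matches, contains matches and the counter at once
    let st := alerts.foldl
      (fun st a =>
        let val := PySem.Str.upper (pvGetOr a field)
        (if val == primary_upper then st.1 ++ [a] else st.1,
         if PySem.Str.isIn primary_upper val then st.2.1 ++ [a] else st.2.1,
         st.2.2.modify (PySem.Str.upper (pvFallback a field)) 0 (· + 1)))
      (([], [], PySem.Dict.empty) : List (List (String × String)) × List (List (String × String)) × PySem.Dict String Int)
    if st.1 ≠ [] then
      (st.1, "Found " ++ PySem.Int.toStr (st.1.length : Int) ++ " " ++ primary_upper ++ " alerts")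
    else if st.2.1 ≠ [] then
      (st.2.1, "Found " ++ PySem.Int.toStr (st.2.1.length : Int) ++ " alerts containing '" ++ primary_upper ++ "'")
    else
      let alternatives := (pvMostCommon5 st.2.2).map (fun p => p.1 ++ ": " ++ pvCommaFmt p.2)
      ([], "No " ++ primary_upper ++ " alerts. However, found: " ++ PySem.Str.join ", " alternatives)

-- ===== PRECONDITION & SPEC =====
def Spec_widen_condition_search (alerts : List (List (String × String))) (primary_condition : String) (field : String) (out : (List (List (String × String))) × String) : Prop := out = widen_condition_search_alt alerts primary_condition field
instance (alerts : List (List (String × String))) (primary_condition : String) (field : String) (out : (List (List (String × String))) × String) : Decidable (Spec_widen_condition_search alerts primary_condition field out) := by unfold Spec_widen_condition_search; infer_instance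

-- ===== CLAIM (what is proved, stated in full; the proofs are below) =====
def Claim_equal_widen_condition_search : Prop := ∀ (alerts : List (List (String × String))) (primary_condition : String) (field : String), Dom_widen_condition_search alerts primary_condition field → Spec_widen_condition_search alerts primary_condition field (widen_condition_search alerts primary_condition field)

-- ===== LEMMAS AND PROOFS =====

-- the fused fold equals the three independent passes
theorem pv_fold3 (field pu : String) (alerts : List (List (String × String)))
    (e c : List (List (String × String))) (d : PySem.Dict String Int) :
    alerts.foldl
      (fun st a =>
        let val := PySem.Str.upper (pvGetOr a field)
        (if val == pu then st.1 ++ [a] else st.1,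
         if PySem.Str.isIn pu val then st.2.1 ++ [a] else st.2.1,
         st.2.2.modify (PySem.Str.upper (pvFallback a field)) 0 (· + 1))) (e, c, d)
    = (e ++ alerts.filter (fun a => PySem.Str.upper (pvGetOr a field) == pu),
       c ++ alerts.filter (fun a => PySem.Str.isIn pu (PySem.Str.upper (pvGetOr a field))),
       alerts.foldl (fun d a => d.modify (PySem.Str.upper (pvFallback a field)) 0 (· + 1)) d) := by
  induction alerts generalizing e c d with
  | nil => simp
  | cons a rest ih =>
    simp only [List.foldl_cons, List.filter_cons, ih]
    by_cases h1 : (PySem.Str.upper (pvGetOr a field) == pu) = true <;>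
      by_cases h2 : PySem.Str.isIn pu (PySem.Str.upper (pvGetOr a field)) = true <;>
        simp_all [List.append_assoc]

theorem pv_msg (pu j : String) :
    ("No " ++ pu ++ " alerts") ++ ". However, found: " ++ j
      = "No " ++ pu ++ " alerts. However, found: " ++ j := by
  simp only [String.append_assoc]
  rfl

-- ===== VERDICT (by name: the statement is the Claim_ definition above) =====
theorem widen_condition_search_spec : Claim_equal_widen_condition_search := by
  intro alerts pc field _
  unfold Spec_widen_condition_search widen_condition_search widen_condition_search_alt
  by_cases hnil : alerts = []
  · simp [hnil]
  · simp only [hnil, ite_false, pv_fold3, List.nil_append, List.headD]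
    split_ifs <;> simp_all [pv_msg]
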